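-- pv_equiv track=rewrite | github.com/jialuli-luka/Debate_Persuation_Argument_Structure | src/generation_stat.py | filter_no_arg
-- ===== SOURCE A (Python) =====
-- def filter_no_arg(debates):
--     # filter out debates without argument structure(eliminated during generation)
--
--     debate_generate = {}
--     flag = False
--     for key, debate in debates.items():
--         for round in debate['rounds']:
--             for side in round:
--                 if 'nodes_cdcp_svm_strict' in side:
--                     flag = True
--                 else:
--                     flag = False
--         if flag:
--             debate_generate[key] = debate
--             flag = False
--
--     return debate_generate
-- ===== SOURCE B (Python) =====
-- def filter_no_arg(debates):
--     # filter out debates without argument structure(eliminated during generation)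
--     return {key: debate for key, debate in debates.items()
--             if any('nodes_cdcp_svm_strict' in side
--                    for round in debate['rounds'] for side in round)}
-- ===== Notes on version B (the rewrite author's own statement) =====
-- stated objective: simpler
-- what changed: Replaces the triple-nested loop threading a mutable flag (overwritten on every side, so only the last side counts) with a dict comprehension keeping a debate iff any() of its sides has argument structure.
-- intended difference: On debates where some side contains 'nodes_cdcp_svm_strict' but the last side (across all rounds) does not, A drops the debate because its flag is overwritten by every later side, while B keeps it; keeping any debate with argument structure is the stated purpose of the filter. — e.g. on filter_no_arg([("a", [("rounds", [[[("nodes_cdcp_svm_strict", "x")], [("other", "y")]]])])]): A returns [], B returns [("a", [("rounds", [[[("nodes_cdcp_svm_strict", "x")], [("other", "y")]]])])]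
import Mathlib
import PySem

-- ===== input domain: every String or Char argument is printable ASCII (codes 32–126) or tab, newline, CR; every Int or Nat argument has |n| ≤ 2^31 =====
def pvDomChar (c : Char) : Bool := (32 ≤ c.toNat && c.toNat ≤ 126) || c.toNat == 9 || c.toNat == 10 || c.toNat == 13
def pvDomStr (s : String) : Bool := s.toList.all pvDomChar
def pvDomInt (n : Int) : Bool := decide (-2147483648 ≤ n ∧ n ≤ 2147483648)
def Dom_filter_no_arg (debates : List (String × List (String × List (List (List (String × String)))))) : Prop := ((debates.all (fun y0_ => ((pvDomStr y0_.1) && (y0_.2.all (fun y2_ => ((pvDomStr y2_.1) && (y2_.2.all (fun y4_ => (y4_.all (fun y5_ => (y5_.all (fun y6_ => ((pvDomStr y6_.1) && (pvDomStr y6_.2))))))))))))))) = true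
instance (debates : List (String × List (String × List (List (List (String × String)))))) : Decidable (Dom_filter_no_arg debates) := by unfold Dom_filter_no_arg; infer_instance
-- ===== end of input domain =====

-- B replaces A's triple-nested loop threading a mutable flag with a dict
-- comprehension keeping debates where any() side has argument structure (simpler);
-- it fixes A's flag-overwrite so debates whose last side lacks the key are kept (see D_).


-- ===== PORT A =====
-- A's step per (key, debate): run the triple-nested loop updating 'flag', then
-- insert if flag and reset flag.  debate['rounds'] is ported with getD [] — the
-- KeyError case (no 'rounds' key) is excluded by Pre_filter_no_arg.
def aStep (st : PySem.Dict String (List (String × List (List (List (String × String))))) × Bool)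
    (kv : String × List (String × List (List (List (String × String))))) :
    PySem.Dict String (List (String × List (List (List (String × String))))) × Bool :=
  let rounds := (PySem.Dict.mk kv.2).getD "rounds" []
  let flag := rounds.foldl
    (fun f round =>
      round.foldl
        (fun _ side =>
          if (PySem.Dict.mk side).contains "nodes_cdcp_svm_strict" then true else false)
        f)
    st.2
  if flag then (st.1.insert kv.1 kv.2, false) else (st.1, flag)

def filter_no_arg (debates : List (String × List (String × List (List (List (String × String)))))) : List (String × List (String × List (List (List (String × String))))) :=
  (debates.foldl aStep (PySem.Dict.empty, false)).1.items

-- ===== PORT B =====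
-- keep a debate iff any side in any round contains the key
def bKeep (debate : List (String × List (List (List (String × String))))) : Bool :=
  ((PySem.Dict.mk debate).getD "rounds" []).any
    (fun round => round.any
      (fun side => (PySem.Dict.mk side).contains "nodes_cdcp_svm_strict"))

def bStep (d : PySem.Dict String (List (String × List (List (List (String × String))))))
    (kv : String × List (String × List (List (List (String × String))))) :
    PySem.Dict String (List (String × List (List (List (String × String))))) :=
  if bKeep kv.2 then d.insert kv.1 kv.2 else d

def filter_no_arg_alt (debates : List (String × List (String × List (List (List (String × String)))))) : List (String × List (String × List (List (List (String × String))))) :=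
  (debates.foldl bStep PySem.Dict.empty).items

-- ===== PRECONDITION & SPEC =====
-- Pre_ excludes exactly the inputs where the Python raises KeyError: a debate
-- value with no 'rounds' key.
def Pre_filter_no_arg (debates : List (String × List (String × List (List (List (String × String)))))) : Prop :=
  ∀ kv ∈ debates, "rounds" ∈ kv.2.map Prod.fst
instance (debates : List (String × List (String × List (List (List (String × String)))))) : Decidable (Pre_filter_no_arg debates) := by unfold Pre_filter_no_arg; infer_instance

def pvWitness_filter_no_arg : (List (String × List (String × List (List (List (String × String)))))) :=
  [("a", [("rounds", [[[("nodes_cdcp_svm_strict", "x")]], []])]),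
   ("b", [("rounds", [[[("other", "y")]]])])]

-- On debates where some side contains 'nodes_cdcp_svm_strict' but the last side
-- (across all rounds) does not, A drops the debate (its flag is overwritten by
-- every later side) while B keeps it; keeping any debate with argument structure
-- is the stated purpose of the filter, so B's value is the intended one.
def D_filter_no_arg (debates : List (String × List (String × List (List (List (String × String)))))) : Prop :=
  ∃ kv ∈ debates,
    (∃ round ∈ ((kv.2.lookup "rounds").getD []), ∃ side ∈ round, ∃ p ∈ side, p.1 = "nodes_cdcp_svm_strict") ∧
    (∀ side ∈ ((((kv.2.lookup "rounds").getD []).flatMap id).getLast?).toList, ∀ p ∈ side, p.1 ≠ "nodes_cdcp_svm_strict")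
instance (debates : List (String × List (String × List (List (List (String × String)))))) : Decidable (D_filter_no_arg debates) := by unfold D_filter_no_arg; infer_instance

def Spec_filter_no_arg (debates : List (String × List (String × List (List (List (String × String)))))) (out : List (String × List (String × List (List (List (String × String)))))) : Prop := ¬ D_filter_no_arg debates → out = filter_no_arg_alt debates
instance (debates : List (String × List (String × List (List (List (String × String)))))) (out : List (String × List (String × List (List (List (String × String)))))) : Decidable (Spec_filter_no_arg debates out) := by
  unfold Spec_filter_no_arg
  haveI : DecidableEq (List (String × List (String × List (List (List (String × String)))))) :=
    @List.hasDecEq _ (@instDecidableEqProd _ _ _ (@List.hasDecEq _ (@instDecidableEqProd _ _ _ (@List.hasDecEq _ (@List.hasDecEq _ (@List.hasDecEq _ (@instDecidableEqProd _ _ _ _)))))))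
  infer_instance

def pvDiffWitness_filter_no_arg : (List (String × List (String × List (List (List (String × String)))))) :=
  [("a", [("rounds", [[[("nodes_cdcp_svm_strict", "x")], [("other", "y")]]])])]
def pvDiffWitnessOut_filter_no_arg : (List (String × List (String × List (List (List (String × String)))))) × (List (String × List (String × List (List (List (String × String)))))) :=
  ([], [("a", [("rounds", [[[("nodes_cdcp_svm_strict", "x")], [("other", "y")]]])])])

-- ===== CLAIM =====
def Claim_unchanged_filter_no_arg : Prop := ∀ (debates : List (String × List (String × List (List (List (String × String)))))), Dom_filter_no_arg debates → Pre_filter_no_arg debates → Spec_filter_no_arg debates (filter_no_arg debates)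
def Claim_changed_filter_no_arg : Prop := Dom_filter_no_arg (pvDiffWitness_filter_no_arg) ∧ Pre_filter_no_arg (pvDiffWitness_filter_no_arg) ∧ D_filter_no_arg (pvDiffWitness_filter_no_arg) ∧ filter_no_arg (pvDiffWitness_filter_no_arg) = pvDiffWitnessOut_filter_no_arg.1 ∧ filter_no_arg_alt (pvDiffWitness_filter_no_arg) = pvDiffWitnessOut_filter_no_arg.2 ∧ pvDiffWitnessOut_filter_no_arg.1 ≠ pvDiffWitnessOut_filter_no_arg.2

-- ===== LEMMAS AND PROOFS =====
theorem lookup_getD {α : Type} (l : List (String × α)) (k : String) (d0 : α) :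
    (PySem.Dict.mk l).getD k d0 = (l.lookup k).getD d0 := by
  simp only [PySem.Dict.getD, PySem.Dict.get?]
  induction l with
  | nil => rfl
  | cons p rest ih =>
    simp only [List.find?_cons, List.lookup]
    by_cases hk : p.1 = k
    · simp [hk]
    · have h1 : (p.1 == k) = false := by simp [hk]
      have h2 : (k == p.1) = false := by
        simp only [beq_eq_false_iff_ne, Ne]
        exact fun h => hk h.symm
      simp [h1, h2, ih]

theorem contains_any (side : List (String × String)) (k : String) :
    ((PySem.Dict.mk side).contains k = true) ↔ (∃ p ∈ side, p.1 = k) := by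
  simp [PySem.Dict.contains]

theorem dcond_iff (kv : String × List (String × List (List (List (String × String))))) :
    ( (∃ round ∈ ((kv.2.lookup "rounds").getD []), ∃ side ∈ round, ∃ p ∈ side, p.1 = "nodes_cdcp_svm_strict") ∧
      (∀ side ∈ ((((kv.2.lookup "rounds").getD []).flatMap id).getLast?).toList, ∀ p ∈ side, p.1 ≠ "nodes_cdcp_svm_strict") )
    ↔ ( ((((PySem.Dict.mk kv.2).getD "rounds" []).flatMap id).any (fun side => (PySem.Dict.mk side).contains "nodes_cdcp_svm_strict")) = true ∧
        (((((PySem.Dict.mk kv.2).getD "rounds" []).flatMap id).getLast?.map (fun side => (PySem.Dict.mk side).contains "nodes_cdcp_svm_strict")).getD false) = false ) := by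
  rw [lookup_getD kv.2 "rounds" []]
  constructor
  · rintro ⟨⟨round, hr, side, hs, hp⟩, hlast⟩
    refine ⟨List.any_eq_true.mpr ⟨side, List.mem_flatMap.mpr ⟨round, hr, hs⟩, (contains_any _ _).mpr hp⟩, ?_⟩
    cases hl : (((kv.2.lookup "rounds").getD []).flatMap id).getLast? with
    | none => simp
    | some s =>
      have := hlast s (by rw [hl]; simp)
      simp only [Option.map_some, Option.getD_some]
      rw [← Bool.not_eq_true]
      intro hc
      obtain ⟨p, hps, hpk⟩ := (contains_any _ _).mp hc
      exact this p hps hpk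
  · rintro ⟨hany, hlast⟩
    obtain ⟨side, hmem, hc⟩ := List.any_eq_true.mp hany
    obtain ⟨round, hr, hs⟩ := List.mem_flatMap.mp hmem
    obtain ⟨p, hps, hpk⟩ := (contains_any _ _).mp hc
    refine ⟨⟨round, hr, side, hs, p, hps, hpk⟩, ?_⟩
    intro s hsmem p hp hpk2
    cases hl : (((kv.2.lookup "rounds").getD []).flatMap id).getLast? with
    | none => rw [hl] at hsmem; simp at hsmem
    | some s' =>
      rw [hl] at hsmem; simp at hsmem; subst hsmem
      rw [hl] at hlast; simp only [Option.map_some, Option.getD_some] at hlast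
      exact absurd ((contains_any _ _).mpr ⟨p, hp, hpk2⟩) (by simp [hlast])


-- the inner per-round loop: flag ends as 'last side has the key', or is unchanged
theorem inner_flag (c : List (String × String) → Bool) :
    ∀ (round : List (List (String × String))) (f : Bool),
      round.foldl (fun _ side => if c side then true else false) f
        = ((round.getLast?).map c).getD f := by
  intro round
  induction round with
  | nil => intro f; simp
  | cons s rest ih =>
    intro f
    rw [List.foldl_cons, ih]
    cases rest with
    | nil => cases h : c s <;> simp [h]
    | cons a t =>
      obtain ⟨x, hx⟩ := Option.isSome_iff_exists.mp (List.getLast?_isSome.mpr (by simp : a :: t ≠ []))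
      simp [List.getLast?_cons_cons, hx]

-- the middle loop over rounds: flag ends as 'last side of the flattened rounds'
theorem outer_flag (c : List (String × String) → Bool) :
    ∀ (rounds : List (List (List (String × String)))) (f : Bool),
      rounds.foldl (fun f round =>
          round.foldl (fun _ side => if c side then true else false) f) f
        = (((rounds.flatMap id).getLast?).map c).getD f := by
  intro rounds
  induction rounds with
  | nil => intro f; simp
  | cons r rest ih =>
    intro f
    rw [List.foldl_cons, ih, inner_flag, List.flatMap_cons, List.getLast?_append]
    cases h : (rest.flatMap id).getLast? <;> simp [Option.or]

-- outside the change region, A's flag (last flattened side) equals B's any()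
theorem keep_eq (c : List (String × String) → Bool)
    (rounds : List (List (List (String × String))))
    (hnd : ¬ (((rounds.flatMap id).any c) = true ∧
              (((rounds.flatMap id).getLast?.map c).getD false) = false)) :
    (((rounds.flatMap id).getLast?.map c).getD false) = rounds.any (fun r => r.any c) := by
  have hany : (rounds.flatMap id).any c = rounds.any (fun r => r.any c) := by
    induction rounds with
    | nil => simp
    | cons r rest ih => simp [List.flatMap_cons]
  cases h : (rounds.flatMap id).any c with
  | true =>
    rw [← hany, h]
    by_contra hne
    exact hnd ⟨h, by revert hne; cases ((rounds.flatMap id).getLast?.map c).getD false <;> simp⟩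
  | false =>
    rw [← hany, h]
    cases hl : (rounds.flatMap id).getLast? with
    | none => simp
    | some s =>
      have hmem := List.mem_of_getLast? hl
      have := List.any_eq_false.mp h s hmem
      simp [this]

-- outside the change region at kv, A's step from flag=false is B's step with flag left false
theorem step_eq (d : PySem.Dict String (List (String × List (List (List (String × String))))))
    (kv : String × List (String × List (List (List (String × String)))))
    (hkv : ¬ (((((PySem.Dict.mk kv.2).getD "rounds" []).flatMap id).any
          (fun side => (PySem.Dict.mk side).contains "nodes_cdcp_svm_strict")) = true ∧
        (((((PySem.Dict.mk kv.2).getD "rounds" []).flatMap id).getLast?.map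
          (fun side => (PySem.Dict.mk side).contains "nodes_cdcp_svm_strict")).getD false) = false)) :
    aStep (d, false) kv = (bStep d kv, false) := by
  unfold aStep bStep bKeep
  dsimp only
  rw [outer_flag, keep_eq _ _ hkv]
  cases h : ((PySem.Dict.mk kv.2).getD "rounds" []).any
      (fun round => round.any (fun side => (PySem.Dict.mk side).contains "nodes_cdcp_svm_strict")) <;>
    simp

-- A's fold, entered with flag = false, coincides with B's fold and leaves flag false
theorem fold_eq :
    ∀ (debates : List (String × List (String × List (List (List (String × String))))))
      (d : PySem.Dict String (List (String × List (List (List (String × String)))))),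
      ¬ D_filter_no_arg debates →
      debates.foldl aStep (d, false) = (debates.foldl bStep d, false) := by
  intro debates
  induction debates with
  | nil => intro d _; rfl
  | cons kv rest ih =>
    intro d hnd
    have hkv : ¬ _ := fun h => hnd ⟨kv, List.mem_cons_self, (dcond_iff kv).mpr h⟩
    have hrest : ¬ D_filter_no_arg rest := fun ⟨x, hx, hc⟩ => hnd ⟨x, List.mem_cons_of_mem _ hx, hc⟩
    rw [List.foldl_cons, List.foldl_cons, step_eq d kv hkv]
    exact ih _ hrest

-- ===== VERDICT =====
theorem filter_no_arg_spec : Claim_unchanged_filter_no_arg := by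
  intro debates _ _ hnd
  unfold filter_no_arg filter_no_arg_alt
  rw [fold_eq _ _ hnd]

theorem filter_no_arg_changed : Claim_changed_filter_no_arg := by
  unfold Claim_changed_filter_no_arg
  refine ⟨by decide, by decide, by decide, rfl, rfl, ?_⟩
  unfold pvDiffWitnessOut_filter_no_arg
  simp
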